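-- pv_equiv track=rewrite | github.com/ansonmiu0214/algorithms | 2018-08-07_Verify-Preorder-Serialisation-BST/solution.py | isValidPreorder
-- ===== SOURCE A (Python) =====
-- def isValidPreorder(nodes, currIndex, end):
--   if currIndex == end:
--     return currIndex, False
--
--   node = nodes[currIndex]
--   if node == '#':
--     return currIndex + 1, True
--
--   # validate left subtree
--   leftNext, leftValid = isValidPreorder(nodes, currIndex + 1, end)
--   if not leftValid:
--     return leftNext, leftValid
--
--   # validate right subtree using remains from left subtree
--   return isValidPreorder(nodes, leftNext, end)
-- ===== SOURCE B (Python) =====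
-- def isValidPreorder(nodes, currIndex, end):
--   need = 1
--   for i in range(currIndex, end):
--     need += -1 if nodes[i] == '#' else 1
--     if need == 0:
--       return i + 1, True
--   return end, False
-- ===== Notes on version B (the rewrite author's own statement) =====
-- stated objective: idiomatic
-- what changed: Replaces A's double recursion over subtrees by a single for-loop over range(currIndex, end) keeping a counter of subtrees still needed (-1 on '#', +1 otherwise), returning (i+1, True) when the counter hits zero and (end, False) on exhaustion.
-- outside the precondition, e.g. on isValidPreorder(['#'], 0, -1): A returns (1, True), B returns (-1, False); on isValidPreorder(['#'], 0, 5): A returns (1, True), B returns (1, True); on isValidPreorder(['#', '#'], 2, 1): A raises IndexError, B returns (1, False)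
import Mathlib
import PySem

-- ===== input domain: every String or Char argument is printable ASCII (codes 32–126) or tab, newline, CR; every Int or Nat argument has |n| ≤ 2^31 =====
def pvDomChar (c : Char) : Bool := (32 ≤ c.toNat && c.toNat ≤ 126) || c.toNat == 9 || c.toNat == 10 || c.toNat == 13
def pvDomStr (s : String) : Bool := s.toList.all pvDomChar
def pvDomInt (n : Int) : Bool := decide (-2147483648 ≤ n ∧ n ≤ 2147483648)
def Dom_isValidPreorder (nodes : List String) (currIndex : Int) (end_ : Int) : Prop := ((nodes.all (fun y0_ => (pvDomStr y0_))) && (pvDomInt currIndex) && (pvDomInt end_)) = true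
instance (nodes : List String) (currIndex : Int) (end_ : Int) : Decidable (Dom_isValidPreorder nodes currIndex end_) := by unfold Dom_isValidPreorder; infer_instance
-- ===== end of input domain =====

-- B replaces A's double recursion by one for-loop over range(currIndex, end) carrying a
-- counter of subtrees still needed (objective: idiomatic iterative decomposition).

-- ===== PORT A =====
-- A's recursion, made total with a fuel counter (fuel only guards termination;
-- inside Pre_ the fuel (end_-currIndex).toNat+1 is proved sufficient).
-- 'none' = IndexError (nodes[currIndex] out of range) or fuel exhausted.
def aFuel (nodes : List String) (end_ : Int) : Nat → Int → Option (Int × Bool)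
  | 0, _ => none
  | f+1, c =>
    if c = end_ then some (c, false)
    else
      (PySem.List.pyGet? nodes c).bind (fun node =>
        if node = "#" then some (c + 1, true)
        else
          -- validate left subtree, then right subtree from where the left ended
          (aFuel nodes end_ f (c + 1)).bind (fun left =>
            if left.2 then aFuel nodes end_ f left.1 else some left))

def isValidPreorder (nodes : List String) (currIndex : Int) (end_ : Int) : Int × Bool :=
  (aFuel nodes end_ ((end_ - currIndex).toNat + 1) currIndex).getD (0, false)

-- ===== PORT B =====
-- Source B's for-loop over range(currIndex, end): structural recursion over the index list.
-- nodes[i] is ported as pyGetD nodes i "" — exact whenever the index is in range, which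
-- Pre_ guarantees for every index the loop reads (outside it B's Python raises IndexError).
def bFor (nodes : List String) (end_ : Int) : List Int → Int → Int × Bool
  | [], _ => (end_, false)
  | i :: rest, need =>
    let need' := need + (if PySem.List.pyGetD nodes i "" = "#" then -1 else 1)
    if need' = 0 then (i + 1, true) else bFor nodes end_ rest need'

def isValidPreorder_alt (nodes : List String) (currIndex : Int) (end_ : Int) : Int × Bool :=
  bFor nodes end_ (PySem.List.pyRange currIndex end_ 1) 1

-- ===== PRECONDITION & SPEC =====
-- Pre_ restricts to calls with -len(nodes) ≤ currIndex ≤ end ≤ len(nodes) (a negative start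
-- index wraps identically in both programs) plus the trivially-returning currIndex = end;
-- outside it A either raises IndexError or returns a value only through an accidental corner
-- of its indexing — end < currIndex (A still reads nodes[currIndex] though the range is empty)
-- or end past the list (A can return when the parse completes before running off the list).
def Pre_isValidPreorder (nodes : List String) (currIndex : Int) (end_ : Int) : Prop :=
  (-(nodes.length : Int) ≤ currIndex ∧ currIndex ≤ end_ ∧ end_ ≤ nodes.length) ∨ currIndex = end_
instance (nodes : List String) (currIndex : Int) (end_ : Int) : Decidable (Pre_isValidPreorder nodes currIndex end_) := by unfold Pre_isValidPreorder; infer_instance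

def pvWitness_isValidPreorder : List String × Int × Int := (["5", "#", "#"], 0, 3)

def Spec_isValidPreorder (nodes : List String) (currIndex : Int) (end_ : Int) (out : Int × Bool) : Prop := out = isValidPreorder_alt nodes currIndex end_
instance (nodes : List String) (currIndex : Int) (end_ : Int) (out : Int × Bool) : Decidable (Spec_isValidPreorder nodes currIndex end_ out) := by unfold Spec_isValidPreorder; infer_instance

-- ===== CLAIM (what is proved, stated in full; the proofs are below) =====
def Claim_equal_isValidPreorder : Prop := ∀ (nodes : List String) (currIndex : Int) (end_ : Int), Dom_isValidPreorder nodes currIndex end_ → Pre_isValidPreorder nodes currIndex end_ → Spec_isValidPreorder nodes currIndex end_ (isValidPreorder nodes currIndex end_)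

-- ===== LEMMAS AND PROOFS =====

theorem aFuel_succ (nodes : List String) (end_ : Int) (f : Nat) (c : Int) :
    aFuel nodes end_ (f+1) c =
      (if c = end_ then some (c, false)
       else
        (PySem.List.pyGet? nodes c).bind (fun node =>
          if node = "#" then some (c + 1, true)
          else
            (aFuel nodes end_ f (c + 1)).bind (fun left =>
              if left.2 then aFuel nodes end_ f left.1 else some left))) := rfl

theorem bFor_cons (nodes : List String) (end_ : Int) (i : Int) (rest : List Int) (need : Int) :
    bFor nodes end_ (i :: rest) need =
      (let need' := need + (if PySem.List.pyGetD nodes i "" = "#" then -1 else 1)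
       if need' = 0 then (i + 1, true) else bFor nodes end_ rest need') := rfl

-- Main simulation: inside the natural domain, A's recursion from c returns (j, v) with
-- c ≤ j ≤ end_ (j = end_ when v = false, c < j when v = true), and B's counter loop over
-- range(c, end_) started with any counter need ≥ 1 either finishes exactly at j (need = 1)
-- or continues from range(j, end_) with counter need - 1 (valid case), resp. returns
-- (end_, false) (invalid case).
theorem main_sim (nodes : List String) (end_ : Int) (hend : end_ ≤ nodes.length) :
    ∀ (n : Nat) (c : Int), (end_ - c).toNat ≤ n → -(nodes.length : Int) ≤ c → c ≤ end_ →
      ∃ j v, aFuel nodes end_ (n + 1) c = some (j, v) ∧ c ≤ j ∧ j ≤ end_ ∧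
        (v = true → c < j) ∧ (v = false → j = end_) ∧
        (v = true → ∀ need : Int, 1 ≤ need →
            bFor nodes end_ (PySem.List.pyRange c end_ 1) need =
              (if need = 1 then (j, true)
               else bFor nodes end_ (PySem.List.pyRange j end_ 1) (need - 1))) ∧
        (v = false → ∀ need : Int, 1 ≤ need →
            bFor nodes end_ (PySem.List.pyRange c end_ 1) need = (end_, false)) := by
  intro n
  induction n using Nat.strong_induction_on with
  | _ n ih =>
    intro c hn hc0 hce
    by_cases hceq : c = end_
    · subst hceq
      refine ⟨c, false, by simp [aFuel], le_refl c, le_refl c, by simp, fun _ => rfl, by simp, ?_⟩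
      intro _ need _
      rw [PySem.List.pyRange_one_eq_nil (le_refl c)]
      rfl
    · have hclt : c < end_ := lt_of_le_of_ne hce hceq
      obtain ⟨m, rfl⟩ : ∃ m, n = m + 1 := ⟨n - 1, by omega⟩
      have hcl : c < (nodes.length : Int) := by omega
      have hnn : PySem.List.pyGet? nodes c ≠ none := by
        intro hn0
        rw [PySem.List.pyGet?_eq_none_iff] at hn0
        exact hn0 ⟨hc0, hcl⟩
      obtain ⟨node, hget⟩ : ∃ nd, PySem.List.pyGet? nodes c = some nd :=
        Option.ne_none_iff_exists'.mp hnn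
      have hgetD : PySem.List.pyGetD nodes c "" = node := by
        show (PySem.List.pyGet? nodes c).getD "" = node
        rw [hget]; rfl
      have hcons := PySem.List.pyRange_one_cons hclt
      by_cases hhash : node = "#"
      · -- leaf token: A returns (c+1, true); B's counter drops by one
        refine ⟨c + 1, true, ?_, by omega, by omega, fun _ => by omega, by simp, ?_, by simp⟩
        · rw [aFuel_succ, if_neg hceq, hget, Option.bind_some, if_pos hhash]
        · intro _ need hneed
          rw [hcons, bFor_cons, hgetD, if_pos hhash]
          by_cases h1 : need = 1
          · subst h1; simp
          · have : ¬ (need + -1 = 0) := by omega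
            simp only [this, if_neg h1, if_false]
            have e1 : need + -1 = need - 1 := by ring
            rw [e1]
      · -- internal node: left subtree then right subtree; B's counter rises by one
        have hm1 : (end_ - (c + 1)).toNat ≤ m := by omega
        obtain ⟨j₁, v₁, ha1, hj1c, hj1e, hj1lt, hj1f, hb1t, hb1f⟩ :=
          ih m (Nat.lt_succ_self m) (c + 1) hm1 (by omega) (by omega)
        -- one B step from c with counter need continues with (range(c+1,end), need+1)
        have step : ∀ need : Int, 1 ≤ need →
            bFor nodes end_ (PySem.List.pyRange c end_ 1) need =
              bFor nodes end_ (PySem.List.pyRange (c+1) end_ 1) (need + 1) := by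
          intro need hneed
          rw [hcons, bFor_cons, hgetD, if_neg hhash]
          have : ¬ (need + 1 = 0) := by omega
          simp only [this, if_false]
        cases v₁ with
        | true =>
          have hj1lt' : c + 1 < j₁ := hj1lt rfl
          have hm2 : (end_ - j₁).toNat ≤ m := by omega
          obtain ⟨j₂, v₂, ha2, hj2c, hj2e, hj2lt, hj2f, hb2t, hb2f⟩ :=
            ih m (Nat.lt_succ_self m) j₁ hm2 (by omega) (by omega)
          have haA : aFuel nodes end_ (m + 1 + 1) c = some (j₂, v₂) := by
            rw [aFuel_succ, if_neg hceq, hget, Option.bind_some, if_neg hhash, ha1,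
              Option.bind_some, if_pos rfl]
            exact ha2
          -- B from c with counter need reaches range(j₁, end_) with the same counter
          have pass : ∀ need : Int, 1 ≤ need →
              bFor nodes end_ (PySem.List.pyRange c end_ 1) need =
                bFor nodes end_ (PySem.List.pyRange j₁ end_ 1) need := by
            intro need hneed
            rw [step need hneed, hb1t rfl (need + 1) (by omega), if_neg (by omega)]
            have e2 : need + 1 - 1 = need := by ring
            rw [e2]
          cases v₂ with
          | true =>
            exact ⟨j₂, true, haA, by omega, hj2e, fun _ => by omega, by simp,
              fun _ need hneed => by rw [pass need hneed, hb2t rfl need hneed], by simp⟩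
          | false =>
            exact ⟨j₂, false, haA, by omega, hj2e, by simp, hj2f, by simp,
              fun _ need hneed => by rw [pass need hneed, hb2f rfl need hneed]⟩
        | false =>
          refine ⟨j₁, false, ?_, by omega, hj1e, by simp, hj1f, by simp, ?_⟩
          · rw [aFuel_succ, if_neg hceq, hget, Option.bind_some, if_neg hhash, ha1,
              Option.bind_some, if_neg (by simp)]
          · intro _ need hneed
            rw [step need hneed, hb1f rfl (need + 1) (by omega)]

-- ===== VERDICT (by name: the statement is the Claim_ definition above) =====
theorem isValidPreorder_spec : Claim_equal_isValidPreorder := by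
  intro nodes c e _ hpre
  unfold Spec_isValidPreorder isValidPreorder isValidPreorder_alt
  rcases hpre with ⟨hc0, hce, hel⟩ | hceq
  · obtain ⟨j, v, ha, hjc, hje, hjlt, hjf, hbt, hbf⟩ :=
      main_sim nodes e hel (e - c).toNat c (le_refl _) hc0 hce
    rw [ha]
    cases v with
    | true => rw [hbt rfl 1 (le_refl 1), if_pos rfl]; rfl
    | false => rw [hbf rfl 1 (le_refl 1)]; simp [hjf rfl]
  · subst hceq
    rw [PySem.List.pyRange_one_eq_nil (le_refl c)]
    simp [aFuel, bFor]
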